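-- pv_equiv track=rewrite | github.com/vmix-woolf/goit-pycore-hw-05 | task03_extra/count_logs.py | count_logs_by_level
-- ===== SOURCE A (Python) =====
-- def count_logs_by_level(logs: list) -> dict:
--     counts = {
--         'info': 0,
--         'warning': 0,
--         'debug': 0,
--         'error': 0,
--     }
--
--     for log in logs:
--         if log['level'] == 'INFO':
--             counts['info'] += 1
--         elif log['level'] == 'WARNING':
--             counts['warning'] += 1
--         elif log['level'] == 'DEBUG':
--             counts['debug'] += 1
--         elif log['level'] == 'ERROR':
--             counts['error'] += 1
--
--     return counts
-- ===== SOURCE B (Python) =====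
-- def count_logs_by_level(logs: list) -> dict:
--     levels = [log['level'] for log in logs]
--     return {name: levels.count(level)
--             for name, level in (('info', 'INFO'), ('warning', 'WARNING'),
--                                 ('debug', 'DEBUG'), ('error', 'ERROR'))}
-- ===== Notes on version B (the rewrite author's own statement) =====
-- stated objective: idiomatic
-- what changed: Drops the accumulating dict and if/elif ladder entirely: extract the levels once, then answer each of the four fixed keys by an independent list.count scan (staged passes, no running counters).
import Mathlib
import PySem

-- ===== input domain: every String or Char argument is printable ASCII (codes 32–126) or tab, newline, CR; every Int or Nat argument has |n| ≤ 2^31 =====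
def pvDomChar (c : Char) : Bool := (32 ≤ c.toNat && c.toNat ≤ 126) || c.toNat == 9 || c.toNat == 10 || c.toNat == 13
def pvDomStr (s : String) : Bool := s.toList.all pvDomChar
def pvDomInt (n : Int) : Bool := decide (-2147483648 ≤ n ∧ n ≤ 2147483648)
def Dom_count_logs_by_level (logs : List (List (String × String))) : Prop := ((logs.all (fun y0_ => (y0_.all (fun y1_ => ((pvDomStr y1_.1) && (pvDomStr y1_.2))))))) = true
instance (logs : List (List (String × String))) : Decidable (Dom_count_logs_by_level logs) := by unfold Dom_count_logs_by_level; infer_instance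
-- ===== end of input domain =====

-- B drops the accumulating dict and if/elif ladder: it extracts the levels once, then fills each of the four fixed keys by an independent levels.count scan.

-- ===== PORT A =====
-- log['level'] (raises KeyError when absent; Pre_ excludes that)
def pvLevel (log : List (String × String)) : String :=
  ((PySem.Dict.mk log).get? "level").getD ""

def count_logs_by_level (logs : List (List (String × String))) : List (String × Int) :=
  let counts : PySem.Dict String Int :=
    PySem.Dict.mk [("info", 0), ("warning", 0), ("debug", 0), ("error", 0)]
  let counts := logs.foldl (fun counts log =>
    if pvLevel log = "INFO" then counts.modify "info" 0 (· + 1)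
    else if pvLevel log = "WARNING" then counts.modify "warning" 0 (· + 1)
    else if pvLevel log = "DEBUG" then counts.modify "debug" 0 (· + 1)
    else if pvLevel log = "ERROR" then counts.modify "error" 0 (· + 1)
    else counts) counts
  counts.items

-- ===== PORT B =====
def count_logs_by_level_alt (logs : List (List (String × String))) : List (String × Int) :=
  let levels := logs.map pvLevel
  [("info", "INFO"), ("warning", "WARNING"), ("debug", "DEBUG"), ("error", "ERROR")].map
    (fun p => (p.1, (PySem.List.count levels p.2 : Int)))

-- ===== PRECONDITION & SPEC =====
-- Pre_ excludes exactly the logs without a 'level' key, on which Python A raises KeyError.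
def Pre_count_logs_by_level (logs : List (List (String × String))) : Prop :=
  ∀ log ∈ logs, "level" ∈ log.map Prod.fst
instance (logs : List (List (String × String))) : Decidable (Pre_count_logs_by_level logs) := by unfold Pre_count_logs_by_level; infer_instance

def pvWitness_count_logs_by_level : (List (List (String × String))) :=
  [[("level", "INFO")], [("level", "TRACE")], [("level", "ERROR")]]

def Spec_count_logs_by_level (logs : List (List (String × String))) (out : List (String × Int)) : Prop := out = count_logs_by_level_alt logs
instance (logs : List (List (String × String))) (out : List (String × Int)) : Decidable (Spec_count_logs_by_level logs out) := by unfold Spec_count_logs_by_level; infer_instance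

-- ===== CLAIM (what is proved, stated in full; the proofs are below) =====
def Claim_equal_count_logs_by_level : Prop := ∀ (logs : List (List (String × String))), Dom_count_logs_by_level logs → Pre_count_logs_by_level logs → Spec_count_logs_by_level logs (count_logs_by_level logs)

-- ===== LEMMAS AND PROOFS =====

-- A's loop keeps exactly the four preset keys; it adds, per key, the number of logs at that level.
lemma foldA_eq (logs : List (List (String × String))) (i w d e : Int) :
    logs.foldl (fun counts log =>
      if pvLevel log = "INFO" then counts.modify "info" 0 (· + 1)
      else if pvLevel log = "WARNING" then counts.modify "warning" 0 (· + 1)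
      else if pvLevel log = "DEBUG" then counts.modify "debug" 0 (· + 1)
      else if pvLevel log = "ERROR" then counts.modify "error" 0 (· + 1)
      else counts)
      (PySem.Dict.mk [("info", i), ("warning", w), ("debug", d), ("error", e)]) =
    PySem.Dict.mk [("info", i + ((logs.map pvLevel).count "INFO" : Int)),
                   ("warning", w + ((logs.map pvLevel).count "WARNING" : Int)),
                   ("debug", d + ((logs.map pvLevel).count "DEBUG" : Int)),
                   ("error", e + ((logs.map pvLevel).count "ERROR" : Int))] := by
  induction logs generalizing i w d e with
  | nil => simp
  | cons hd tl ih =>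
    simp only [List.foldl_cons, List.map_cons, List.count_cons]
    by_cases h1 : pvLevel hd = "INFO"
    · rw [if_pos h1]
      have : PySem.Dict.modify (PySem.Dict.mk [("info", i), ("warning", w), ("debug", d), ("error", e)]) "info" 0 (· + 1) =
          PySem.Dict.mk [("info", i + 1), ("warning", w), ("debug", d), ("error", e)] := by
        simp [PySem.Dict.modify, PySem.Dict.getD, PySem.Dict.get?, PySem.Dict.insert]
      rw [this, ih]
      simp [h1]
      ring
    · by_cases h2 : pvLevel hd = "WARNING"
      · rw [if_neg h1, if_pos h2]
        have : PySem.Dict.modify (PySem.Dict.mk [("info", i), ("warning", w), ("debug", d), ("error", e)]) "warning" 0 (· + 1) =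
            PySem.Dict.mk [("info", i), ("warning", w + 1), ("debug", d), ("error", e)] := by
          simp [PySem.Dict.modify, PySem.Dict.getD, PySem.Dict.get?, PySem.Dict.insert]
        rw [this, ih]
        simp [h2]
        ring
      · by_cases h3 : pvLevel hd = "DEBUG"
        · rw [if_neg h1, if_neg h2, if_pos h3]
          have : PySem.Dict.modify (PySem.Dict.mk [("info", i), ("warning", w), ("debug", d), ("error", e)]) "debug" 0 (· + 1) =
              PySem.Dict.mk [("info", i), ("warning", w), ("debug", d + 1), ("error", e)] := by
            simp [PySem.Dict.modify, PySem.Dict.getD, PySem.Dict.get?, PySem.Dict.insert]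
          rw [this, ih]
          simp [h3]
          ring
        · by_cases h4 : pvLevel hd = "ERROR"
          · rw [if_neg h1, if_neg h2, if_neg h3, if_pos h4]
            have : PySem.Dict.modify (PySem.Dict.mk [("info", i), ("warning", w), ("debug", d), ("error", e)]) "error" 0 (· + 1) =
                PySem.Dict.mk [("info", i), ("warning", w), ("debug", d), ("error", e + 1)] := by
              simp [PySem.Dict.modify, PySem.Dict.getD, PySem.Dict.get?, PySem.Dict.insert]
            rw [this, ih]
            simp [h4]
            ring
          · rw [if_neg h1, if_neg h2, if_neg h3, if_neg h4, ih]
            simp [h1, h2, h3, h4]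

-- ===== VERDICT (by name: the statement is the Claim_ definition above) =====
theorem count_logs_by_level_spec : Claim_equal_count_logs_by_level := by
  intro logs _ _
  unfold Spec_count_logs_by_level count_logs_by_level count_logs_by_level_alt
  simp only [foldA_eq]
  simp [PySem.List.count_eq]
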